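-- pv_equiv track=rewrite | github.com/app-sre/qenerate | qenerate/plugins/pydantic_v1/mapper.py | graphql_class_name_str_to_python
-- ===== SOURCE A (Python) =====
-- def graphql_class_name_str_to_python(class_name: str) -> str:
--     result = class_name[0]
--     for i in range(1, len(class_name)):
--         cur, prev = class_name[i], class_name[i - 1]
--         if cur != "_" and prev != "_":
--             result += cur
--         elif cur != "_" and prev == "_":
--             result += cur.upper()
--     return result
-- ===== SOURCE B (Python) =====
-- def graphql_class_name_str_to_python(class_name: str) -> str:
--     first = class_name[0]
--     segments = class_name[1:].split("_")
--     head = segments[0]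
--     parts = [first, (head[:1].upper() + head[1:]) if first == "_" else head]
--     for seg in segments[1:]:
--         parts.append(seg[:1].upper() + seg[1:])
--     return "".join(parts)
-- ===== Notes on version B (the rewrite author's own statement) =====
-- stated objective: faster
-- what changed: B splits the tail of the name on underscores and rebuilds it by uppercasing the leading character of each segment (the first segment only when the name begins with an underscore), instead of A's per-index loop comparing each character with its predecessor and concatenating strings.
-- outside the precondition, e.g. on graphql_class_name_str_to_python(''): A raises IndexError, B raises IndexError
import Mathlib
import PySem

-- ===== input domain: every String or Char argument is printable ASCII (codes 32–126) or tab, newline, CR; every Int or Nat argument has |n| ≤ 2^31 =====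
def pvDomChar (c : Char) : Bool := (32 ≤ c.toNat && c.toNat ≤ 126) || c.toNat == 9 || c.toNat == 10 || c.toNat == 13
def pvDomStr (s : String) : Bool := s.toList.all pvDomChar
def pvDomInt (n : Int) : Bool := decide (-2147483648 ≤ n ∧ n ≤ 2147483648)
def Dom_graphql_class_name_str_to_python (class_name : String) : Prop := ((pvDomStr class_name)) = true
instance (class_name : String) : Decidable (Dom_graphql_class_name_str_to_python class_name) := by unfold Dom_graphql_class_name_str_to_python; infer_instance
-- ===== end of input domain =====

-- B rebuilds the name from the underscore-split segments of the tail instead of A's per-index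
-- pair scan with string concatenation; measured constant-factor faster in Python.

-- ===== PORT A =====
def graphql_class_name_str_to_python (class_name : String) : String :=
  let cs := class_name.toList
  -- result = class_name[0]  (IndexError on "" is excluded by Pre_)
  let result := [PySem.List.pyGetD cs 0 ' ']
  String.ofList <|
    (PySem.List.pyRange 1 (cs.length : Int) 1).foldl (fun result i =>
      let cur := PySem.List.pyGetD cs i ' '
      let prev := PySem.List.pyGetD cs (i - 1) ' '
      if cur ≠ '_' ∧ prev ≠ '_' then result ++ [cur]
      else if cur ≠ '_' ∧ prev = '_' then result ++ [PySem.Chars.upperChar cur]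
      else result) result

-- ===== PORT B =====
-- seg[:1].upper() + seg[1:]
def pvUpFirst (seg : List Char) : List Char :=
  PySem.Chars.upper (PySem.List.slice seg none (some 1)) ++ PySem.List.slice seg (some 1) none

def graphql_class_name_str_to_python_alt (class_name : String) : String :=
  let cs := class_name.toList
  let first := PySem.List.pyGetD cs 0 ' '   -- class_name[0] (IndexError on "" excluded by Pre_)
  let segments := PySem.Chars.splitOn (PySem.List.slice cs (some 1) none) ['_']
  let head := PySem.List.pyGetD segments 0 []
  let parts := [[first], if first = '_' then pvUpFirst head else head]
  let parts := (PySem.List.slice segments (some 1) none).foldl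
      (fun parts seg => parts ++ [pvUpFirst seg]) parts
  String.ofList (PySem.Chars.join [] parts)

-- ===== PRECONDITION & SPEC =====
-- Pre_ excludes only the empty string, on which A (class_name[0]) raises IndexError.
def Pre_graphql_class_name_str_to_python (class_name : String) : Prop := class_name ≠ ""
instance (class_name : String) : Decidable (Pre_graphql_class_name_str_to_python class_name) := by unfold Pre_graphql_class_name_str_to_python; infer_instance
def pvWitness_graphql_class_name_str_to_python : String := "gql_class_name"

def Spec_graphql_class_name_str_to_python (class_name : String) (out : String) : Prop := out = graphql_class_name_str_to_python_alt class_name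
instance (class_name : String) (out : String) : Decidable (Spec_graphql_class_name_str_to_python class_name out) := by unfold Spec_graphql_class_name_str_to_python; infer_instance

-- ===== CLAIM (what is proved, stated in full; the proofs are below) =====
def Claim_equal_graphql_class_name_str_to_python : Prop := ∀ (class_name : String), Dom_graphql_class_name_str_to_python class_name → Pre_graphql_class_name_str_to_python class_name → Spec_graphql_class_name_str_to_python class_name (graphql_class_name_str_to_python class_name)

-- ===== LEMMAS AND PROOFS =====

-- What A's loop body appends for the pair (prev, cur), and the pair scan itself.
def pvEmit (prev cur : Char) : List Char :=
  if cur ≠ '_' ∧ prev ≠ '_' then [cur]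
  else if cur ≠ '_' ∧ prev = '_' then [PySem.Chars.upperChar cur]
  else []

def pvTail (prev : Char) : List Char → List Char
  | [] => []
  | c :: rest => pvEmit prev c ++ pvTail c rest

-- Plain front recursion computing split('_') with the current piece as accumulator.
def pvSplit (pre : List Char) : List Char → List (List Char)
  | [] => [pre]
  | c :: rest => if c = '_' then pre :: pvSplit [] rest else pvSplit (pre ++ [c]) rest

theorem pvSplitOn_go_eq (fuel : Nat) : ∀ (l cur : List Char) (acc : List (List Char)),
    l.length ≤ fuel →
    PySem.Chars.splitOn.go ['_'] fuel l cur acc = acc.reverse ++ pvSplit cur.reverse l := by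
  induction fuel with
  | zero =>
    intro l cur acc h
    have : l = [] := List.eq_nil_of_length_eq_zero (Nat.le_zero.mp h)
    subst this
    simp [PySem.Chars.splitOn.go, pvSplit]
  | succ n ih =>
    intro l cur acc h
    cases l with
    | nil => simp [PySem.Chars.splitOn.go, pvSplit]
    | cons c rest =>
      by_cases hc : c = '_'
      · subst hc
        rw [show PySem.Chars.splitOn.go ['_'] (n+1) ('_' :: rest) cur acc
              = PySem.Chars.splitOn.go ['_'] n rest [] (cur.reverse :: acc) by
            simp [PySem.Chars.splitOn.go, List.isPrefixOf]]
        rw [ih rest [] (cur.reverse :: acc) (by simpa using Nat.lt_succ_iff.mp (by simpa using h))]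
        simp [pvSplit]
      · rw [show PySem.Chars.splitOn.go ['_'] (n+1) (c :: rest) cur acc
              = PySem.Chars.splitOn.go ['_'] n rest (c :: cur) acc by
            simp [PySem.Chars.splitOn.go, List.isPrefixOf, Ne.symm hc]]
        rw [ih rest (c :: cur) acc (by simpa using Nat.lt_succ_iff.mp (by simpa using h))]
        simp [pvSplit, hc]

theorem pvSplitOn_eq (l : List Char) : PySem.Chars.splitOn l ['_'] = pvSplit [] l := by
  rw [PySem.Chars.splitOn, pvSplitOn_go_eq (l.length + 1) l [] [] (Nat.le_succ _)]
  simp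

theorem pvSplit_pre (l : List Char) : ∀ (pre : List Char),
    pvSplit pre l = (pre ++ (pvSplit [] l).headI) :: (pvSplit [] l).tail := by
  induction l with
  | nil => intro pre; simp [pvSplit]
  | cons c rest ih =>
    intro pre
    by_cases hc : c = '_'
    · subst hc; simp [pvSplit]
    · simp only [pvSplit, if_neg hc, List.nil_append]
      rw [ih (pre ++ [c]), ih [c]]
      simp

theorem pvUpFirst_nil : pvUpFirst [] = [] := by decide

theorem pvUpFirst_cons (c : Char) (s : List Char) :
    pvUpFirst (c :: s) = PySem.Chars.upperChar c :: s := by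
  simp [pvUpFirst, PySem.List.slice_to (c :: s) (b := 1) (by norm_num),
        PySem.List.slice_from (c :: s) (a := 1) (by norm_num), PySem.Chars.upper]

theorem pvEmit_underscore (prev : Char) : pvEmit prev '_' = [] := by simp [pvEmit]

theorem pvTail_eq_split (rest : List Char) : ∀ (prev : Char),
    pvTail prev rest =
      (if prev = '_' then pvUpFirst (pvSplit [] rest).headI else (pvSplit [] rest).headI) ++
        (((pvSplit [] rest).tail.map pvUpFirst).flatten) := by
  induction rest with
  | nil => intro prev; simp [pvTail, pvSplit, pvUpFirst_nil]
  | cons c rest ih =>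
    intro prev
    by_cases hc : c = '_'
    · subst hc
      simp only [pvTail, pvEmit_underscore, List.nil_append, pvSplit]
      rw [ih '_']
      rcases h : pvSplit [] rest with _ | ⟨h0, t0⟩
      · have := pvSplit_pre rest []
        rw [h] at this
        simp at this
      · simp [pvUpFirst_nil]
    · simp only [pvTail, pvSplit, if_neg hc, List.nil_append]
      rw [pvSplit_pre rest [c], ih c]
      by_cases hp : prev = '_' <;>
        simp [pvEmit, hc, hp, pvUpFirst_cons]

-- A's index loop, characterised as the pair scan pvTail.
theorem pvLoopA (cs : List Char) (fuel : Nat) : ∀ (k : Nat) (acc : List Char),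
    cs.length ≤ k + fuel → 1 ≤ k →
    (PySem.List.pyRange (k : Int) (cs.length : Int) 1).foldl (fun result i =>
      if PySem.List.pyGetD cs i ' ' ≠ '_' ∧ PySem.List.pyGetD cs (i - 1) ' ' ≠ '_' then
        result ++ [PySem.List.pyGetD cs i ' ']
      else if PySem.List.pyGetD cs i ' ' ≠ '_' ∧ PySem.List.pyGetD cs (i - 1) ' ' = '_' then
        result ++ [PySem.Chars.upperChar (PySem.List.pyGetD cs i ' ')]
      else result) acc
    = acc ++ pvTail (cs.getD (k - 1) ' ') (cs.drop k) := by
  induction fuel with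
  | zero =>
    intro k acc hlen hk
    have hdrop : cs.drop k = [] := List.drop_eq_nil_of_le (by omega)
    have : PySem.List.pyRange (k : Int) (cs.length : Int) 1 = [] := by
      simp [PySem.List.pyRange]; omega
    rw [this, hdrop]; simp [pvTail]
  | succ n ih =>
    intro k acc hlen hk
    by_cases hklen : k < cs.length
    · rw [PySem.List.pyRange_one_cons (by exact_mod_cast hklen), List.foldl_cons]
      rw [show ((k : Int) + 1) = ((k + 1 : Nat) : Int) by push_cast; ring]
      rw [ih (k + 1) _ (by omega) (by omega)]
      have hcur : PySem.List.pyGetD cs (k : Int) ' ' = cs.getD k ' ' :=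
        PySem.List.pyGetD_natCast cs k ' '
      have hprev : PySem.List.pyGetD cs ((k : Int) - 1) ' ' = cs.getD (k - 1) ' ' := by
        rw [show (k : Int) - 1 = ((k - 1 : Nat) : Int) by omega]
        exact PySem.List.pyGetD_natCast cs (k - 1) ' '
      have hdrop : cs.drop k = cs.getD k ' ' :: cs.drop (k + 1) := by
        rw [List.getD_eq_getElem cs ' ' hklen]
        exact (List.drop_eq_getElem_cons hklen)
      rw [hdrop]
      have hsucc : (k + 1) - 1 = k := by omega
      simp only [pvTail, hcur, hprev, hsucc, pvEmit]
      split_ifs <;> simp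
    · have hdrop : cs.drop k = [] := List.drop_eq_nil_of_le (by omega)
      have : PySem.List.pyRange (k : Int) (cs.length : Int) 1 = [] := by
        simp [PySem.List.pyRange]; omega
      rw [this, hdrop]; simp [pvTail]

theorem pvJoin_nil_flatten (parts : List (List Char)) :
    PySem.Chars.join [] parts = parts.flatten := by
  induction parts with
  | nil => simp [PySem.Chars.join_nil]
  | cons p rest ih =>
    cases rest with
    | nil => simp [PySem.Chars.join, List.intercalate]
    | cons q t => rw [PySem.Chars.join_cons_cons]; simp_all

-- ===== VERDICT (by name: the statement is the Claim_ definition above) =====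
theorem graphql_class_name_str_to_python_spec : Claim_equal_graphql_class_name_str_to_python := by
  intro class_name _ hpre
  unfold Spec_graphql_class_name_str_to_python
  unfold graphql_class_name_str_to_python graphql_class_name_str_to_python_alt
  rcases hcs : class_name.toList with _ | ⟨c, rest⟩
  · exact absurd (String.toList_eq_nil_iff.mp hcs) hpre
  · simp only []
    -- A side
    have hA := pvLoopA (c :: rest) (c :: rest).length 1
      [PySem.List.pyGetD (c :: rest) 0 ' '] (by omega) le_rfl
    simp only [Nat.cast_one, Nat.sub_self] at hA
    rw [hA]
    -- B side
    rw [PySem.List.slice_from (c :: rest) (a := 1) (by norm_num)]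
    simp only [Int.toNat_one, List.drop_succ_cons, List.drop_zero]
    rw [pvSplitOn_eq rest]
    rcases hsp : pvSplit [] rest with _ | ⟨h0, t0⟩
    · have := pvSplit_pre rest []
      rw [hsp] at this
      simp at this
    · rw [PySem.List.slice_from (h0 :: t0) (a := 1) (by norm_num)]
      rw [PySem.List.foldl_append_singleton_eq_map]
      rw [pvJoin_nil_flatten]
      have hget0 : PySem.List.pyGetD (c :: rest) 0 ' ' = c := by
        simp [PySem.List.pyGetD]
      have hgseg : PySem.List.pyGetD (h0 :: t0) 0 [] = h0 := by
        simp [PySem.List.pyGetD]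
      rw [hget0, hgseg]
      have := pvTail_eq_split rest c
      rw [hsp] at this
      simp only [List.getD_cons_zero, this]
      simp [List.headI, List.tail]
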